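-- pv_equiv track=rewrite | github.com/clearledgr/Clearledgr-AP | clearledgr/services/vendor_domain_lock.py | domain_matches_allowlist
-- ===== SOURCE A (Python) =====
-- from typing import Any, Iterable, List, Optional
--
-- def domain_matches_allowlist(
--     sender_domain: str,
--     allowlist: Iterable[str],
-- ) -> bool:
--     """Return True iff ``sender_domain`` is allowed.
--
--     A match is one of:
--       - Exact equality with any entry in the allowlist, OR
--       - ``sender_domain`` ends with ``.{entry}`` (dot-boundary suffix)
--
--     Dot-boundary suffix matching means:
--       - ``acme.com`` allows ``billing.acme.com`` ✓
--       - ``acme.com`` does NOT allow ``fake-acme.com`` ✗ (no dot before ``acme.com``)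
--       - ``acme.com`` does NOT allow ``acme.com.evil`` ✗ (not a suffix)
--
--     Both sides are compared after normalization (lowercase + strip).
--     """
--     if not sender_domain:
--         return False
--     sender = sender_domain.strip().lower()
--     if not sender:
--         return False
--     for entry in allowlist or ():
--         normalized = str(entry or "").strip().lower().strip(".")
--         if not normalized:
--             continue
--         if sender == normalized:
--             return True
--         if sender.endswith("." + normalized):
--             return True
--     return False
-- ===== SOURCE B (Python) =====
-- def domain_matches_allowlist(sender_domain, allowlist):
--     if not sender_domain:
--         return False
--     sender = sender_domain.strip().lower()
--     if not sender:
--         return False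
--     entries = set()
--     for entry in allowlist or ():
--         normalized = str(entry or "").strip().lower().strip(".")
--         if normalized:
--             entries.add(normalized)
--     if sender in entries:
--         return True
--     for i, ch in enumerate(sender):
--         if ch == "." and sender[i + 1:] in entries:
--             return True
--     return False
-- ===== Notes on version B (the rewrite author's own statement) =====
-- stated objective: idiomatic
-- what changed: B normalizes the allowlist once into a set, then tests the sender itself and each dot-bounded suffix of the sender for set membership, instead of A's per-entry scan doing an equality and an endswith test for every allowlist entry.
import Mathlib
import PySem

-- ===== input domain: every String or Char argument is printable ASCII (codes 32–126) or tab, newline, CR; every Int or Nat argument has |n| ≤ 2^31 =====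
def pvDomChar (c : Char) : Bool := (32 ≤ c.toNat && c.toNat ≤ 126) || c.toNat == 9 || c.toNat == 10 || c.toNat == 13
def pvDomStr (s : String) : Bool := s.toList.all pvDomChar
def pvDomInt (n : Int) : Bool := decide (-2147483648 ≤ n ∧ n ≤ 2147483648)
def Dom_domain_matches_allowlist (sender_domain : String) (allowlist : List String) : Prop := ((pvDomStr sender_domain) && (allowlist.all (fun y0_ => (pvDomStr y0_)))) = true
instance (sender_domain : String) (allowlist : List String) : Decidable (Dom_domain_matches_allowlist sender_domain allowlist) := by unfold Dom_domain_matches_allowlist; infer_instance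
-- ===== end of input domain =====

-- B indexes the normalized allowlist once in a set and probes only the sender's dot-bounded
-- suffixes instead of scanning every entry (objective: idiomatic/alternative data-structure pass).

-- ===== PORT A =====
-- shared normalization step: str(entry or "").strip().lower().strip(".") on code points
def pvNorm (e : String) : List Char :=
  PySem.Chars.stripChars (PySem.Chars.lower (PySem.Chars.strip e.toList)) ['.']

-- the 'for entry in allowlist' loop of A (early return = true)
def pvAloop (sender : List Char) : List String → Bool
  | [] => false
  | e :: rest =>
    let normalized := pvNorm e
    if normalized == [] then pvAloop sender rest
    else if sender == normalized then true
    else if PySem.Chars.endswith sender ('.' :: normalized) then true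
    else pvAloop sender rest

def domain_matches_allowlist (sender_domain : String) (allowlist : List String) : Bool :=
  if sender_domain.toList == [] then false
  else if PySem.Chars.lower (PySem.Chars.strip sender_domain.toList) == [] then false
  else pvAloop (PySem.Chars.lower (PySem.Chars.strip sender_domain.toList)) allowlist

-- ===== PORT B =====
-- the set-building loop of B
def pvBuildSet (allowlist : List String) : PySem.Set (List Char) :=
  allowlist.foldl
    (fun s e =>
      let normalized := pvNorm e
      if normalized == [] then s else PySem.Set.add s normalized)
    PySem.Set.empty

-- B's 'for i, ch in enumerate(sender)' loop: probe the suffix after each '.'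
def pvSuffLoop (entries : PySem.Set (List Char)) : List Char → Bool
  | [] => false
  | c :: rest =>
    if c == '.' && PySem.Set.contains entries rest then true
    else pvSuffLoop entries rest

def domain_matches_allowlist_alt (sender_domain : String) (allowlist : List String) : Bool :=
  if sender_domain.toList == [] then false
  else if PySem.Chars.lower (PySem.Chars.strip sender_domain.toList) == [] then false
  else if PySem.Set.contains (pvBuildSet allowlist) (PySem.Chars.lower (PySem.Chars.strip sender_domain.toList)) then true
  else pvSuffLoop (pvBuildSet allowlist) (PySem.Chars.lower (PySem.Chars.strip sender_domain.toList))

-- ===== PRECONDITION & SPEC =====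
def Spec_domain_matches_allowlist (sender_domain : String) (allowlist : List String) (out : Bool) : Prop := out = domain_matches_allowlist_alt sender_domain allowlist
instance (sender_domain : String) (allowlist : List String) (out : Bool) : Decidable (Spec_domain_matches_allowlist sender_domain allowlist out) := by unfold Spec_domain_matches_allowlist; infer_instance

-- ===== CLAIM (what is proved, stated in full; the proofs are below) =====
def Claim_equal_domain_matches_allowlist : Prop := ∀ (sender_domain : String) (allowlist : List String), Dom_domain_matches_allowlist sender_domain allowlist → Spec_domain_matches_allowlist sender_domain allowlist (domain_matches_allowlist sender_domain allowlist)

-- ===== LEMMAS AND PROOFS =====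

theorem pvAloop_iff (sender : List Char) (l : List String) :
    pvAloop sender l = true ↔
      ∃ e ∈ l, pvNorm e ≠ [] ∧ (sender = pvNorm e ∨ ('.' :: pvNorm e) <:+ sender) := by
  induction l with
  | nil => simp [pvAloop]
  | cons e rest ih =>
    simp only [pvAloop]
    split_ifs with h1 h2 h3
    · simp_all
    · simp only [beq_iff_eq] at h2
      simp only [true_iff]
      exact ⟨e, by simp, by simpa using h1, Or.inl h2⟩
    · rw [PySem.Chars.endswith_iff] at h3
      simp only [true_iff]
      exact ⟨e, by simp, by simpa using h1, Or.inr h3⟩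
    · rw [ih]
      simp only [beq_iff_eq] at h2
      rw [PySem.Chars.endswith_iff] at h3
      constructor
      · rintro ⟨f, hf, hn, hd⟩; exact ⟨f, by simp [hf], hn, hd⟩
      · rintro ⟨f, hf, hn, hd⟩
        rcases List.mem_cons.mp hf with rfl | hf
        · rcases hd with rfl | hd
          · exact absurd rfl h2
          · exact absurd hd (by simpa using h3)
        · exact ⟨f, hf, hn, hd⟩

theorem pvBuildSet_mem_aux (l : List String) (s : PySem.Set (List Char)) (x : List Char) :
    x ∈ l.foldl
        (fun s e =>
          let normalized := pvNorm e
          if normalized == [] then s else PySem.Set.add s normalized) s ↔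
      x ∈ s ∨ ∃ e ∈ l, pvNorm e = x ∧ pvNorm e ≠ [] := by
  induction l generalizing s with
  | nil => simp
  | cons e rest ih =>
    simp only [List.foldl_cons, ih]
    split_ifs with h1
    · simp only [beq_iff_eq] at h1
      constructor
      · rintro (hx | hx)
        · exact Or.inl hx
        · exact Or.inr (by rcases hx with ⟨f, hf, h⟩; exact ⟨f, by simp [hf], h⟩)
      · rintro (hx | ⟨f, hf, hfx, hfn⟩)
        · exact Or.inl hx
        · rcases List.mem_cons.mp hf with rfl | hf
          · exact absurd h1 hfn
          · exact Or.inr ⟨f, hf, hfx, hfn⟩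
    · simp only [beq_iff_eq] at h1
      rw [PySem.Set.mem_add]
      constructor
      · rintro ((hx | rfl) | hx)
        · exact Or.inl hx
        · exact Or.inr ⟨e, by simp, rfl, h1⟩
        · exact Or.inr (by rcases hx with ⟨f, hf, h⟩; exact ⟨f, by simp [hf], h⟩)
      · rintro (hx | ⟨f, hf, hfx, hfn⟩)
        · exact Or.inl (Or.inl hx)
        · rcases List.mem_cons.mp hf with rfl | hf
          · exact Or.inl (Or.inr hfx.symm)
          · exact Or.inr ⟨f, hf, hfx, hfn⟩

theorem pvBuildSet_contains (l : List String) (x : List Char) :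
    PySem.Set.contains (pvBuildSet l) x = true ↔ ∃ e ∈ l, pvNorm e = x ∧ pvNorm e ≠ [] := by
  have h : x ∈ pvBuildSet l ↔
      x ∈ (PySem.Set.empty : PySem.Set (List Char)) ∨ ∃ e ∈ l, pvNorm e = x ∧ pvNorm e ≠ [] :=
    pvBuildSet_mem_aux l PySem.Set.empty x
  simp only [PySem.Set.empty, List.not_mem_nil, false_or] at h
  simp [PySem.Set.contains, h]

theorem pvSuffLoop_iff (S : PySem.Set (List Char)) (cs : List Char) :
    pvSuffLoop S cs = true ↔ ∃ t, ('.' :: t) <:+ cs ∧ PySem.Set.contains S t = true := by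
  induction cs with
  | nil => simp [pvSuffLoop]
  | cons c rest ih =>
    simp only [pvSuffLoop]
    split_ifs with h1
    · simp only [Bool.and_eq_true, beq_iff_eq] at h1
      simp only [true_iff]
      exact ⟨rest, by simp [h1.1], h1.2⟩
    · rw [ih]
      constructor
      · rintro ⟨t, ht, hc⟩; exact ⟨t, (List.suffix_cons_iff).mpr (Or.inr ht), hc⟩
      · rintro ⟨t, ht, hc⟩
        rcases (List.suffix_cons_iff).mp ht with heq | ht
        · obtain ⟨h1', h2'⟩ : '.' = c ∧ t = rest := by
            injection heq with ha hb; exact ⟨ha, hb⟩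
          subst h1'; subst h2'
          simp_all
        · exact ⟨t, ht, hc⟩

-- ===== VERDICT (by name: the statement is the Claim_ definition above) =====
theorem domain_matches_allowlist_spec : Claim_equal_domain_matches_allowlist := by
  intro sender_domain allowlist _
  unfold Spec_domain_matches_allowlist domain_matches_allowlist domain_matches_allowlist_alt
  by_cases h1 : (sender_domain.toList == []) = true
  · rw [if_pos h1, if_pos h1]
  · rw [if_neg h1, if_neg h1]
    set sender := PySem.Chars.lower (PySem.Chars.strip sender_domain.toList) with hs
    by_cases h2 : (sender == []) = true
    · rw [if_pos h2, if_pos h2]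
    · rw [if_neg h2, if_neg h2]
      have hne : sender ≠ [] := by simpa using h2
      rw [Bool.eq_iff_iff, pvAloop_iff]
      constructor
      · rintro ⟨e, he, hn, hm⟩
        rcases hm with heq | hd
        · rw [if_pos ((pvBuildSet_contains allowlist sender).mpr ⟨e, he, heq.symm, hn⟩)]
        · split_ifs with hc
          · rfl
          · exact (pvSuffLoop_iff _ _).mpr ⟨pvNorm e, hd,
              (pvBuildSet_contains allowlist _).mpr ⟨e, he, rfl, hn⟩⟩
      · intro hb
        split_ifs at hb with hc
        · obtain ⟨e, he, hx, hn⟩ := (pvBuildSet_contains allowlist sender).mp hc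
          exact ⟨e, he, hn, Or.inl hx.symm⟩
        · obtain ⟨t, ht, hc'⟩ := (pvSuffLoop_iff _ _).mp hb
          obtain ⟨e, he, hx, hn⟩ := (pvBuildSet_contains allowlist t).mp hc'
          exact ⟨e, he, hn, Or.inr (hx ▸ ht)⟩
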